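-- pv_equiv track=rewrite | github.com/amanzi/amanzi | tools/formatting/clean.py | strip_words
-- ===== SOURCE A (Python) =====
-- def strip_words(string, patterns):
--     """Similar to string.strip, but with words instead of characters"""
--     done = False
--     while not done:
--         stripped_any = False
--         for pattern in patterns:
--             if string.startswith(pattern):
--                 stripped_any = True
--                 string = string[len(pattern):]
--             if string.endswith(pattern):
--                 stripped_any = True
--                 string = string[:-len(pattern)]
--         if not stripped_any:
--             done = True
--     return string
-- ===== SOURCE B (Python) =====
-- def strip_words(string, patterns):
--     """Similar to string.strip, but with words instead of characters"""
--     lo, hi = 0, len(string)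
--     stripped_any = True
--     while stripped_any:
--         stripped_any = False
--         for pattern in patterns:
--             n = len(pattern)
--             if n and string.startswith(pattern, lo, hi):
--                 stripped_any = True
--                 lo += n
--             if n and string.endswith(pattern, lo, hi):
--                 stripped_any = True
--                 hi -= n
--     return string[lo:hi]
-- ===== Notes on version B (the rewrite author's own statement) =====
-- stated objective: alternative
-- what changed: B keeps two index pointers lo/hi into the original string and tests patterns with bounded startswith/endswith, slicing only once at the end, instead of A's building a new string copy at every strip.
import Mathlib
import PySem

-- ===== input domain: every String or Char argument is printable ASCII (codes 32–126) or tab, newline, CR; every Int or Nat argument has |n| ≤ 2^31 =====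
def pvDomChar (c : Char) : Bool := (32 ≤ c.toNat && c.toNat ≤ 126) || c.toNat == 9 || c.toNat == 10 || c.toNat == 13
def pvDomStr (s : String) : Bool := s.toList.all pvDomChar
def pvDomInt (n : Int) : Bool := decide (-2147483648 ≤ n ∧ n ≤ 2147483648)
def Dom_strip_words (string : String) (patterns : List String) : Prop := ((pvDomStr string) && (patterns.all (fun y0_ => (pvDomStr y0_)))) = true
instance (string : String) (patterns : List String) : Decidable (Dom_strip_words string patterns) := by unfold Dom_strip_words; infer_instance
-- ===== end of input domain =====

-- B replaces A's per-strip string copies by two index pointers into the original string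
-- (bounded startswith/endswith), slicing once at the end.

-- ===== PORT A =====
-- one pass of A's `for pattern in patterns` body; state = (current string, stripped_any)
def stripPassA (patterns : List String) (s : List Char) : List Char × Bool :=
  patterns.foldl (fun st p =>
    let st :=
      if PySem.Chars.startswith st.1 p.toList then
        (PySem.List.slice st.1 (some (p.toList.length : Int)) none, true)
      else st
    if PySem.Chars.endswith st.1 p.toList then
      (PySem.List.slice st.1 none (some (-(p.toList.length : Int))), true)
    else st) (s, false)

-- A's while loop; fuel length+1 suffices because a productive pass with nonempty
-- patterns strictly shortens the string (A itself never returns when "" ∈ patterns,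
-- which Pre_ excludes)
def stripLoopA (patterns : List String) : Nat → List Char → List Char
  | 0, s => s
  | fuel+1, s =>
    let st := stripPassA patterns s
    if st.2 then stripLoopA patterns fuel st.1 else st.1

def strip_words (string : String) (patterns : List String) : String :=
  String.ofList (stripLoopA patterns (string.toList.length + 1) string.toList)

-- ===== PORT B =====
-- string.startswith(p, lo, hi) / string.endswith(p, lo, hi); exact for 0 ≤ lo ≤ hi ≤ len s
def startsAt (s p : List Char) (lo hi : Nat) : Bool :=
  decide (lo + p.length ≤ hi) && PySem.Chars.startswith (s.drop lo) p
def endsAt (s p : List Char) (lo hi : Nat) : Bool :=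
  decide (lo + p.length ≤ hi) && PySem.Chars.startswith (s.drop (hi - p.length)) p

-- one pass of B's for body; state = (lo, hi, stripped_any)
def stripPassB (s : List Char) (patterns : List String) (lo hi : Nat) : Nat × Nat × Bool :=
  patterns.foldl (fun st p =>
    let n := p.toList.length
    let st : Nat × Nat × Bool :=
      if n ≠ 0 && startsAt s p.toList st.1 st.2.1 then (st.1 + n, st.2.1, true) else st
    if n ≠ 0 && endsAt s p.toList st.1 st.2.1 then (st.1, st.2.1 - n, true) else st)
    (lo, hi, false)

-- B's while loop on the two pointers (same fuel bound as A's port)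
def stripLoopB (s : List Char) (patterns : List String) : Nat → Nat → Nat → Nat × Nat
  | 0, lo, hi => (lo, hi)
  | fuel+1, lo, hi =>
    let st := stripPassB s patterns lo hi
    if st.2.2 then stripLoopB s patterns fuel st.1 st.2.1 else (st.1, st.2.1)

def strip_words_alt (string : String) (patterns : List String) : String :=
  let l := string.toList
  let st := stripLoopB l patterns (l.length + 1) 0 l.length
  String.ofList ((l.drop st.1).take (st.2 - st.1))

-- ===== PRECONDITION & SPEC =====
-- Pre_ excludes an empty-string pattern: there Python A loops forever (startswith("")
-- is always true, so stripped_any never goes false) and never returns.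
def Pre_strip_words (string : String) (patterns : List String) : Prop := "" ∉ patterns
instance (string : String) (patterns : List String) : Decidable (Pre_strip_words string patterns) := by unfold Pre_strip_words; infer_instance
def pvWitness_strip_words : String × List String := ("  hello  ", [" ", "he"])

def Spec_strip_words (string : String) (patterns : List String) (out : String) : Prop := out = strip_words_alt string patterns
instance (string : String) (patterns : List String) (out : String) : Decidable (Spec_strip_words string patterns out) := by unfold Spec_strip_words; infer_instance

-- ===== CLAIM (what is proved, stated in full; the proofs are below) =====
def Claim_equal_strip_words : Prop := ∀ (string : String) (patterns : List String), Dom_strip_words string patterns → Pre_strip_words string patterns → Spec_strip_words string patterns (strip_words string patterns)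

-- ===== LEMMAS AND PROOFS =====

-- the substring of s that B's pointers (lo, hi) denote
def pvWindow (s : List Char) (lo hi : Nat) : List Char := (s.drop lo).take (hi - lo)

theorem pvWindow_zero_len (s : List Char) : pvWindow s 0 s.length = s := by
  simp [pvWindow]

theorem pvWindow_length (s : List Char) (lo hi : Nat) (h1 : lo ≤ hi) (h2 : hi ≤ s.length) :
    (pvWindow s lo hi).length = hi - lo := by
  simp [pvWindow]; omega

theorem starts_window (s p : List Char) (lo hi : Nat) (h1 : lo ≤ hi) (h2 : hi ≤ s.length) :
    PySem.Chars.startswith (pvWindow s lo hi) p = startsAt s p lo hi := by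
  rw [Bool.eq_iff_iff]
  simp only [PySem.Chars.startswith_iff, startsAt, Bool.and_eq_true, decide_eq_true_eq,
    pvWindow, List.prefix_take_iff]
  constructor
  · rintro ⟨h3, h4⟩; exact ⟨by omega, h3⟩
  · rintro ⟨h3, h4⟩; exact ⟨h4, by omega⟩

theorem drop_window (s p : List Char) (lo hi : Nat) (h : lo + p.length ≤ hi) :
    PySem.List.slice (pvWindow s lo hi) (some (p.length : Int)) none = pvWindow s (lo + p.length) hi := by
  rw [PySem.List.slice_from_natCast]
  unfold pvWindow
  rw [List.drop_take, List.drop_drop]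
  congr 1
  omega

theorem ends_window (s p : List Char) (lo hi : Nat) (h1 : lo ≤ hi) (h2 : hi ≤ s.length)
    (hp : p ≠ []) :
    PySem.Chars.endswith (pvWindow s lo hi) p = endsAt s p lo hi := by
  have ht : (pvWindow s lo hi).length = hi - lo := pvWindow_length s lo hi h1 h2
  by_cases hn : p.length ≤ hi - lo
  · have key : (pvWindow s lo hi).drop ((pvWindow s lo hi).length - p.length)
        = (s.drop (hi - p.length)).take p.length := by
      rw [ht]
      unfold pvWindow
      rw [List.drop_take, List.drop_drop]
      congr 1
      · omega
      · congr 1; omega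
    rw [Bool.eq_iff_iff]
    simp only [PySem.Chars.endswith_iff, endsAt, Bool.and_eq_true, decide_eq_true_eq,
      PySem.Chars.startswith_iff]
    rw [List.prefix_iff_eq_take, List.suffix_iff_eq_drop, key]
    constructor
    · intro h; exact ⟨by omega, h⟩
    · rintro ⟨-, h⟩; exact h
  · rw [Bool.eq_iff_iff]
    simp only [PySem.Chars.endswith_iff, endsAt, Bool.and_eq_true, decide_eq_true_eq]
    constructor
    · intro h
      have := h.length_le
      rw [ht] at this
      omega
    · rintro ⟨h, -⟩; omega

theorem take_window (s p : List Char) (lo hi : Nat) (hp : p ≠ []) (h : lo + p.length ≤ hi)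
    (h2 : hi ≤ s.length) :
    PySem.List.slice (pvWindow s lo hi) none (some (-(p.length : Int))) = pvWindow s lo (hi - p.length) := by
  have hn : 0 < p.length := List.length_pos_iff.mpr hp
  rw [PySem.List.slice_to_neg_natCast _ _ hn, pvWindow_length s lo hi (by omega) h2]
  unfold pvWindow
  rw [List.take_take]
  congr 1
  omega

theorem pass_eq (s : List Char) (ps : List String) (hps : ∀ p ∈ ps, p.toList ≠ []) :
    ∀ lo hi (b : Bool), lo ≤ hi → hi ≤ s.length →
      (ps.foldl (fun st p =>
        let st :=
          if PySem.Chars.startswith st.1 p.toList then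
            (PySem.List.slice st.1 (some (p.toList.length : Int)) none, true)
          else st
        if PySem.Chars.endswith st.1 p.toList then
          (PySem.List.slice st.1 none (some (-(p.toList.length : Int))), true)
        else st) (pvWindow s lo hi, b)
       = (fun st : Nat × Nat × Bool => (pvWindow s st.1 st.2.1, st.2.2))
          (ps.foldl (fun st p =>
            let n := p.toList.length
            let st : Nat × Nat × Bool :=
              if n ≠ 0 && startsAt s p.toList st.1 st.2.1 then (st.1 + n, st.2.1, true) else st
            if n ≠ 0 && endsAt s p.toList st.1 st.2.1 then (st.1, st.2.1 - n, true) else st) (lo, hi, b)))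
      ∧ (ps.foldl (fun st p =>
            let n := p.toList.length
            let st : Nat × Nat × Bool :=
              if n ≠ 0 && startsAt s p.toList st.1 st.2.1 then (st.1 + n, st.2.1, true) else st
            if n ≠ 0 && endsAt s p.toList st.1 st.2.1 then (st.1, st.2.1 - n, true) else st) (lo, hi, b)).1
          ≤ (ps.foldl (fun st p =>
            let n := p.toList.length
            let st : Nat × Nat × Bool :=
              if n ≠ 0 && startsAt s p.toList st.1 st.2.1 then (st.1 + n, st.2.1, true) else st
            if n ≠ 0 && endsAt s p.toList st.1 st.2.1 then (st.1, st.2.1 - n, true) else st) (lo, hi, b)).2.1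
      ∧ (ps.foldl (fun st p =>
            let n := p.toList.length
            let st : Nat × Nat × Bool :=
              if n ≠ 0 && startsAt s p.toList st.1 st.2.1 then (st.1 + n, st.2.1, true) else st
            if n ≠ 0 && endsAt s p.toList st.1 st.2.1 then (st.1, st.2.1 - n, true) else st) (lo, hi, b)).2.1
          ≤ s.length := by
  revert hps
  induction ps with
  | nil =>
    intro _ lo hi b h1 h2
    exact ⟨rfl, h1, h2⟩
  | cons p ps ih =>
    intro hps lo hi b h1 h2
    have hp : p.toList ≠ [] := hps p (List.mem_cons_self ..)
    have hlp : 0 < p.toList.length := List.length_pos_iff.mpr hp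
    have hn : (decide (p.toList.length ≠ 0)) = true := decide_eq_true (by omega)
    have hps' : ∀ q ∈ ps, q.toList ≠ [] := fun q hq => hps q (List.mem_cons_of_mem _ hq)
    simp only [List.foldl_cons]
    rw [starts_window s p.toList lo hi h1 h2]
    by_cases hc1 : startsAt s p.toList lo hi = true
    · have hb1 : lo + p.toList.length ≤ hi := by
        unfold startsAt at hc1
        simp only [Bool.and_eq_true, decide_eq_true_eq] at hc1
        exact hc1.1
      simp only [hc1, hn, Bool.true_and, if_true]
      rw [drop_window s p.toList lo hi hb1,
          ends_window s p.toList (lo + p.toList.length) hi (by omega) h2 hp]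
      by_cases hc2 : endsAt s p.toList (lo + p.toList.length) hi = true
      · have hb2 : (lo + p.toList.length) + p.toList.length ≤ hi := by
          unfold endsAt at hc2
          simp only [Bool.and_eq_true, decide_eq_true_eq] at hc2
          exact hc2.1
        simp only [hc2, if_true]
        rw [take_window s p.toList (lo + p.toList.length) hi hp hb2 h2]
        exact ih hps' (lo + p.toList.length) (hi - p.toList.length) true (by omega) (by omega)
      · simp only [hc2, if_false, Bool.false_eq_true]
        exact ih hps' (lo + p.toList.length) hi true (by omega) h2
    · simp only [hc1, hn, Bool.true_and, if_false, Bool.false_eq_true]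
      rw [ends_window s p.toList lo hi h1 h2 hp]
      by_cases hc2 : endsAt s p.toList lo hi = true
      · have hb2 : lo + p.toList.length ≤ hi := by
          unfold endsAt at hc2
          simp only [Bool.and_eq_true, decide_eq_true_eq] at hc2
          exact hc2.1
        simp only [hc2, if_true]
        rw [take_window s p.toList lo hi hp hb2 h2]
        exact ih hps' lo (hi - p.toList.length) true (by omega) (by omega)
      · simp only [hc2, if_false, Bool.false_eq_true]
        exact ih hps' lo hi b h1 h2

theorem passAB (s : List Char) (ps : List String) (hps : ∀ p ∈ ps, p.toList ≠ [])
    (lo hi : Nat) (h1 : lo ≤ hi) (h2 : hi ≤ s.length) :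
    stripPassA ps (pvWindow s lo hi)
      = (fun st : Nat × Nat × Bool => (pvWindow s st.1 st.2.1, st.2.2)) (stripPassB s ps lo hi)
    ∧ (stripPassB s ps lo hi).1 ≤ (stripPassB s ps lo hi).2.1
    ∧ (stripPassB s ps lo hi).2.1 ≤ s.length := by
  unfold stripPassA stripPassB
  exact pass_eq s ps hps lo hi false h1 h2


theorem loop_eq (s : List Char) (ps : List String) (hps : ∀ p ∈ ps, p.toList ≠ []) :
    ∀ fuel lo hi, lo ≤ hi → hi ≤ s.length →
      stripLoopA ps fuel (pvWindow s lo hi)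
        = (fun st : Nat × Nat => pvWindow s st.1 st.2) (stripLoopB s ps fuel lo hi) := by
  intro fuel
  induction fuel with
  | zero =>
    intro lo hi h1 h2
    simp [stripLoopA, stripLoopB]
  | succ f ihf =>
    intro lo hi h1 h2
    obtain ⟨heq, hb1, hb2⟩ := passAB s ps hps lo hi h1 h2
    simp only [stripLoopA, stripLoopB, heq]
    rcases hq : stripPassB s ps lo hi with ⟨lo', hi', any⟩
    rw [hq] at hb1 hb2
    cases any with
    | false => rfl
    | true => exact ihf lo' hi' hb1 hb2

-- ===== VERDICT (by name: the statement is the Claim_ definition above) =====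
theorem strip_words_spec : Claim_equal_strip_words := by
  intro string patterns _ hpre
  unfold Spec_strip_words strip_words strip_words_alt
  have hps : ∀ p ∈ patterns, p.toList ≠ [] := by
    intro p hp hnil
    exact hpre (by simpa [show p = "" from by cases p; simp_all] using hp)
  have := loop_eq string.toList patterns hps (string.toList.length + 1) 0 string.toList.length
    (Nat.zero_le _) le_rfl
  rw [pvWindow_zero_len] at this
  simp only [this, pvWindow]
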